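-- pv_equiv track=rewrite | github.com/reahl/swordfish | src/reahl/swordfish/gemstone/browser.py | selector_keyword_tokens
-- ===== SOURCE A (Python) =====
-- def selector_keyword_tokens(selector):
--     if ':' not in selector:
--         return []
--     selector_parts = selector.split(':')
--     if not selector_parts or selector_parts[-1] != '':
--         return []
--     return [
--         keyword + ':'
--         for keyword in selector_parts[:-1]
--         if keyword
--     ]
-- ===== SOURCE B (Python) =====
-- def selector_keyword_tokens(selector):
--     if not selector.endswith(':'):
--         return []
--     result = []
--     buf = ''
--     for ch in selector:
--         if ch == ':':
--             if buf:
--                 result.append(buf + ':')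
--             buf = ''
--         else:
--             buf += ch
--     return result
-- ===== Notes on version B (the rewrite author's own statement) =====
-- stated objective: alternative
-- what changed: Replaced the two membership/last-element checks and the split-then-filter comprehension by a single endswith guard followed by one left-to-right character scan that emits each buffered keyword with a trailing colon as it meets the colon.
import Mathlib
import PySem

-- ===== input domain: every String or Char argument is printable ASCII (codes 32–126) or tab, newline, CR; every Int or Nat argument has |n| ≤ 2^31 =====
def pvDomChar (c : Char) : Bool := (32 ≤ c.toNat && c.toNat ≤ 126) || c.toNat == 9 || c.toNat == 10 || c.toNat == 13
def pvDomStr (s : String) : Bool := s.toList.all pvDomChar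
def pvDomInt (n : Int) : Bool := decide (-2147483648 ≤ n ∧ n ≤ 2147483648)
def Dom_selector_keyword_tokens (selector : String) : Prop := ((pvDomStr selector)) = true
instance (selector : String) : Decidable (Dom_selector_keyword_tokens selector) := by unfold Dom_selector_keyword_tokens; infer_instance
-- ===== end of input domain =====

-- B replaces A's split-then-filter comprehension (and its two guards) by a single
-- endswith guard plus one left-to-right character scan with a current-keyword buffer.

-- ===== PORT A =====
def selector_keyword_tokens (selector : String) : List String :=
  if PySem.Str.isIn ":" selector = false then []
  else
    let selector_parts := PySem.Chars.splitOn selector.toList [':']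
    if selector_parts = [] ∨ selector_parts.getLast? ≠ some [] then []
    else
      ((PySem.List.slice selector_parts none (some (-1))).filter (fun k => k ≠ [])).map
        (fun k => String.ofList (k ++ [':']))

-- ===== PORT B =====
def selector_keyword_tokens_alt (selector : String) : List String :=
  if PySem.Str.endswith selector ":" = false then []
  else
    (selector.toList.foldl
      (fun (st : List String × List Char) ch =>
        if ch = ':' then
          ((if st.2 ≠ [] then st.1 ++ [String.ofList (st.2 ++ [':'])] else st.1), [])
        else (st.1, st.2 ++ [ch]))
      ([], [])).1

-- ===== PRECONDITION & SPEC =====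
def Spec_selector_keyword_tokens (selector : String) (out : List String) : Prop := out = selector_keyword_tokens_alt selector
instance (selector : String) (out : List String) : Decidable (Spec_selector_keyword_tokens selector out) := by unfold Spec_selector_keyword_tokens; infer_instance

-- ===== CLAIM (what is proved, stated in full; the proofs are below) =====
def Claim_equal_selector_keyword_tokens : Prop := ∀ (selector : String), Dom_selector_keyword_tokens selector → Spec_selector_keyword_tokens selector (selector_keyword_tokens selector)

-- ===== LEMMAS AND PROOFS =====

/-- Structural model of `s.split(':')` used only in the proofs. -/
def pvSplit : List Char → List Char → List (List Char)
  | buf, [] => [buf]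
  | buf, c :: cs => if c = ':' then buf :: pvSplit [] cs else pvSplit (buf ++ [c]) cs

theorem pvSplit_ne_nil (buf cs) : pvSplit buf cs ≠ [] := by
  induction cs generalizing buf with
  | nil => simp [pvSplit]
  | cons c cs ih => simp only [pvSplit]; split <;> simp [ih]

theorem getLastD_irrel {α : Type} (l : List α) (h : l ≠ []) (a b : α) :
    l.getLastD a = l.getLastD b := by
  obtain ⟨x, xs, rfl⟩ := List.exists_cons_of_ne_nil h
  rw [List.getLastD_cons, List.getLastD_cons]

theorem splitOn_go_eq (fuel : Nat) :
    ∀ (cs cur : List Char) (accs : List (List Char)), cs.length < fuel →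
    PySem.Chars.splitOn.go [':'] fuel cs cur accs = accs.reverse ++ pvSplit cur.reverse cs := by
  induction fuel with
  | zero => intro cs _ _ h; omega
  | succ fuel ih =>
    intro cs cur accs h
    cases cs with
    | nil => simp [PySem.Chars.splitOn.go, pvSplit]
    | cons c rest =>
      rw [PySem.Chars.splitOn.go]
      by_cases hc : c = ':'
      · subst hc
        have hpre : List.isPrefixOf [':'] (':' :: rest) = true := by simp [List.isPrefixOf]
        simp only [hpre, if_pos]
        have hdrop : List.drop [':'].length (':' :: rest) = rest := rfl
        rw [hdrop, ih rest [] (cur.reverse :: accs) (by simpa using Nat.lt_of_succ_lt_succ h)]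
        simp [pvSplit]
      · have hpre : List.isPrefixOf [':'] (c :: rest) = false := by
          simp [List.isPrefixOf]
          exact fun hh => hc hh.symm
        simp only [hpre]
        rw [if_neg (by simp)]
        rw [ih rest (c :: cur) accs (by simpa using Nat.lt_of_succ_lt_succ h)]
        simp [pvSplit, hc]

theorem splitOn_eq_pvSplit (cs : List Char) :
    PySem.Chars.splitOn cs [':'] = pvSplit [] cs := by
  have := splitOn_go_eq (cs.length + 1) cs [] [] (by omega)
  simpa [PySem.Chars.splitOn] using this

/-- The last piece of the split is empty iff the string ends with ':'. -/
theorem pvSplit_getLast?_nil (buf cs) (hcs : cs ≠ []) :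
    (pvSplit buf cs).getLast? = some [] ↔ cs.getLast hcs = ':' := by
  induction cs generalizing buf with
  | nil => exact absurd rfl hcs
  | cons c rest ih =>
    cases rest with
    | nil =>
      by_cases hc : c = ':' <;> simp [pvSplit, hc]
    | cons d ds =>
      have h2 : (d :: ds : List Char) ≠ [] := by simp
      have hlast : (c :: d :: ds : List Char).getLast hcs = (d :: ds).getLast h2 := by
        simp [List.getLast_cons]
      rw [hlast, pvSplit]
      split
      · obtain ⟨x, xs, hx⟩ := List.exists_cons_of_ne_nil (pvSplit_ne_nil [] (d :: ds))
        rw [hx, List.getLast?_cons_cons, ← hx]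
        exact ih [] h2
      · exact ih _ h2

/-- B's step function (definitionally equal to the lambda in the port of B). -/
def pvStep (st : List String × List Char) (ch : Char) : List String × List Char :=
  if ch = ':' then
    ((if st.2 ≠ [] then st.1 ++ [String.ofList (st.2 ++ [':'])] else st.1), [])
  else (st.1, st.2 ++ [ch])

/-- B's fold, in terms of the split model. -/
theorem foldl_eq_pvSplit (cs : List Char) : ∀ (acc : List String) (buf : List Char),
    cs.foldl pvStep (acc, buf)
    = (acc ++ (((pvSplit buf cs).dropLast.filter (fun k => k ≠ [])).map
          (fun k => String.ofList (k ++ [':']))),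
       (pvSplit buf cs).getLastD []) := by
  induction cs with
  | nil => intro acc buf; simp [pvSplit]
  | cons c rest ih =>
    intro acc buf
    rw [List.foldl_cons]
    by_cases hc : c = ':'
    · subst hc
      have hstep : pvStep (acc, buf) ':'
          = ((if buf ≠ [] then acc ++ [String.ofList (buf ++ [':'])] else acc), []) := by
        simp [pvStep]
      have hne := pvSplit_ne_nil [] rest
      have hT : (pvSplit buf (':' :: rest)).dropLast = buf :: (pvSplit [] rest).dropLast := by
        rw [pvSplit, if_pos rfl]
        exact List.dropLast_cons_of_ne_nil hne
      have hL : (pvSplit buf (':' :: rest)).getLastD [] = (pvSplit [] rest).getLastD [] := by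
        rw [pvSplit, if_pos rfl, List.getLastD_cons]
        exact getLastD_irrel _ hne buf []
      rw [hstep]
      by_cases hb : buf = []
      · rw [if_neg (by simp [hb]), ih, hT, hL]
        simp [hb]
      · rw [if_pos hb, ih, hT, hL]
        simp [hb]
    · have hstep : pvStep (acc, buf) c = (acc, buf ++ [c]) := by
        simp [pvStep, hc]
      have hT : pvSplit buf (c :: rest) = pvSplit (buf ++ [c]) rest := by
        rw [pvSplit, if_neg hc]
      rw [hstep, ih, hT]

theorem endswith_last (cs : List Char) (hcs : cs ≠ []) :
    PySem.Chars.endswith cs [':'] = true ↔ cs.getLast hcs = ':' := by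
  rw [PySem.Chars.endswith_iff]
  constructor
  · rintro ⟨t, ht⟩
    have : cs.getLast hcs = (t ++ [':']).getLast (by simp) := by
      simp [ht]
    simpa using this
  · intro h
    exact ⟨cs.dropLast, by rw [← h]; exact (List.dropLast_append_getLast hcs)⟩

-- ===== VERDICT (by name: the statement is the Claim_ definition above) =====
theorem selector_keyword_tokens_spec : Claim_equal_selector_keyword_tokens := by
  intro selector _
  unfold Spec_selector_keyword_tokens selector_keyword_tokens selector_keyword_tokens_alt
  have hin : PySem.Str.isIn ":" selector = PySem.Chars.isIn [':'] selector.toList := by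
    simp [PySem.Str.isIn_eq]
  have hend : PySem.Str.endswith selector ":" = PySem.Chars.endswith selector.toList [':'] := by
    simp [PySem.Str.endswith_eq]
  rw [hin, hend, splitOn_eq_pvSplit]
  set cs := selector.toList with hcsdef
  by_cases hnil : cs = []
  · rw [hnil]
    decide
  by_cases hE : PySem.Chars.endswith cs [':'] = true
  · -- ends with ':' : both produce the tokens
    have hlastc : cs.getLast hnil = ':' := (endswith_last cs hnil).1 hE
    have hsuf : [':'] <:+ cs :=
      ⟨cs.dropLast, by rw [← hlastc]; exact (List.dropLast_append_getLast hnil)⟩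
    have hinT : PySem.Chars.isIn [':'] cs = true := by
      rw [PySem.Chars.isIn_iff_infix]; exact hsuf.isInfix
    have hlast : (pvSplit [] cs).getLast? = some [] := (pvSplit_getLast?_nil [] cs hnil).2 hlastc
    rw [hinT, hE]
    rw [if_neg (by simp)]
    rw [if_neg (by simp [pvSplit_ne_nil, hlast])]
    rw [if_neg (by simp)]
    rw [show (fun (st : List String × List Char) ch =>
        if ch = ':' then
          ((if st.2 ≠ [] then st.1 ++ [String.ofList (st.2 ++ [':'])] else st.1), [])
        else (st.1, st.2 ++ [ch])) = pvStep from rfl]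
    rw [foldl_eq_pvSplit cs [] []]
    rw [PySem.List.slice_to_neg_one]
    simp
  · -- does not end with ':' : both return []
    have hEf : PySem.Chars.endswith cs [':'] = false := by
      cases h : PySem.Chars.endswith cs [':'] <;> simp_all
    rw [hEf, if_pos rfl]
    by_cases hI : PySem.Chars.isIn [':'] cs = true
    · rw [hI]
      rw [if_neg (by simp)]
      rw [if_pos]
      right
      intro h
      exact hE ((endswith_last cs hnil).2 ((pvSplit_getLast?_nil [] cs hnil).1 h))
    · have h2 : PySem.Chars.isIn [':'] cs = false := by
        cases h : PySem.Chars.isIn [':'] cs <;> simp_all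
      rw [h2, if_pos rfl]
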